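-- pv_equiv track=rewrite | github.com/leninhowlader/Biome-BGC-UI | output.py | sortAlphaNumericList
-- ===== SOURCE A (Python) =====
-- def sortAlphaNumericList(alphaNumbericList):
--     numericList = []
--     textList = []
--     for item in alphaNumbericList:
--         try:
--             numericList.append(int(item))
--         except:
--             textList.append(item)
--
--     temp = []
--     numericList.sort()
--     textList.sort()
--
--     for item in numericList:
--         temp.append(str(item))
--
--     for text in textList:
--         temp.append(text)
--
--     return temp
-- ===== SOURCE B (Python) =====
-- def sortAlphaNumericList(alphaNumbericList):
--     # One pass decorates each item with a sortable tagged key; one sort; one decode.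
--     keys = []
--     for item in alphaNumbericList:
--         try:
--             keys.append((0, int(item)))
--         except:
--             keys.append((1, item))
--     keys.sort()
--     return [str(k[1]) if k[0] == 0 else k[1] for k in keys]
-- ===== Notes on version B (the rewrite author's own statement) =====
-- stated objective: alternative
-- what changed: Replaces A's two partition lists and two independent sorts with a decorate-sort-undecorate single pass: each item is tagged once with a composite (0,int)/(1,text) key, one sort over the tagged list orders numbers before text, and the result is decoded from the sorted keys.
import Mathlib
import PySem

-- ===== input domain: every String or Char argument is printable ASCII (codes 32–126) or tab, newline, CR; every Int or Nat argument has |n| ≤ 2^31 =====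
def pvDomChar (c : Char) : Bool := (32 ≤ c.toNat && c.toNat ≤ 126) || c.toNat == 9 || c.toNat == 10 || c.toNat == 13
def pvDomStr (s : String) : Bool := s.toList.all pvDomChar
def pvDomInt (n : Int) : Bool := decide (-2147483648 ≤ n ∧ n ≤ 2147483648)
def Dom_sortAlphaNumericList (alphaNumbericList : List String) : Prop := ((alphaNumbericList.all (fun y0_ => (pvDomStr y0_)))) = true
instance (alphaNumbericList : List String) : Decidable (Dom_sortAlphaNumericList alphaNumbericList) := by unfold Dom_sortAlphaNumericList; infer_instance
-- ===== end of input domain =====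

-- B replaces A's two partitions + two independent sorts by one decorated single sort:
-- each item is tagged once ((0,int) or (1,text), in Lean a lexicographic Int ⊕ String key),
-- the tagged list is sorted once, and the result is decoded from the sorted keys. Alternative
-- decomposition, same asymptotic cost; return value only (A mutates nothing observable).


-- ===== PORT A =====
def sortAlphaNumericList (alphaNumbericList : List String) : List String :=
  -- for item in alphaNumbericList: try numericList.append(int(item)) except textList.append(item)
  let p := alphaNumbericList.foldl (fun (acc : List Int × List String) item =>
      match PySem.Int.ofStr? item with
      | some n => (acc.1 ++ [n], acc.2)
      | none   => (acc.1, acc.2 ++ [item])) ([], [])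
  let numericList := PySem.List.sorted p.1 (fun x => x) false
  let textList := PySem.List.sorted p.2 (fun x => x) false
  let temp := numericList.foldl (fun temp item => temp ++ [PySem.Int.toStr item]) []
  let temp := textList.foldl (fun temp text => temp ++ [text]) temp
  temp

-- ===== PORT B =====
-- the Python key tuple (0, n) / (1, item): encoded as the lexicographic sum Int ⊕ₗ String
-- (every (0,_) before every (1,_), ints compared with ints, strings with strings — exact)
def pvKey (item : String) : Lex (Int ⊕ String) :=
  match PySem.Int.ofStr? item with
  | some n => toLex (Sum.inl n)
  | none   => toLex (Sum.inr item)

-- str(k[1]) if k[0] == 0 else k[1]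
def pvDecode (k : Lex (Int ⊕ String)) : String :=
  match ofLex k with
  | Sum.inl n => PySem.Int.toStr n
  | Sum.inr s => s

def sortAlphaNumericList_alt (alphaNumbericList : List String) : List String :=
  let keys := alphaNumbericList.foldl (fun ks item => ks ++ [pvKey item]) []
  (PySem.List.sorted keys (fun x => x) false).map pvDecode

-- ===== PRECONDITION & SPEC =====
def Spec_sortAlphaNumericList (alphaNumbericList : List String) (out : List String) : Prop := out = sortAlphaNumericList_alt alphaNumbericList
instance (alphaNumbericList : List String) (out : List String) : Decidable (Spec_sortAlphaNumericList alphaNumbericList out) := by unfold Spec_sortAlphaNumericList; infer_instance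

-- ===== CLAIM (what is proved, stated in full; the proofs are below) =====
def Claim_equal_sortAlphaNumericList : Prop := ∀ (alphaNumbericList : List String), Dom_sortAlphaNumericList alphaNumbericList → Spec_sortAlphaNumericList alphaNumbericList (sortAlphaNumericList alphaNumbericList)

-- ===== LEMMAS AND PROOFS =====

def pvNums (xs : List String) : List Int := xs.filterMap PySem.Int.ofStr?
def pvTexts (xs : List String) : List String := xs.filter (fun s => (PySem.Int.ofStr? s).isNone)

theorem pvFoldA (xs : List String) (a : List Int) (b : List String) :
    xs.foldl (fun (acc : List Int × List String) item =>
      match PySem.Int.ofStr? item with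
      | some n => (acc.1 ++ [n], acc.2)
      | none   => (acc.1, acc.2 ++ [item])) (a, b)
    = (a ++ pvNums xs, b ++ pvTexts xs) := by
  induction xs generalizing a b with
  | nil => simp [pvNums, pvTexts]
  | cons x t ih =>
    cases h : PySem.Int.ofStr? x with
    | some n => simp [List.foldl_cons, h, ih, pvNums, pvTexts]
    | none => simp [List.foldl_cons, h, ih, pvNums, pvTexts]

theorem pvPermPart (xs : List String) :
    ((pvNums xs).map (fun n => toLex (Sum.inl n : Int ⊕ String))
      ++ (pvTexts xs).map (fun s => toLex (Sum.inr s : Int ⊕ String))).Perm (xs.map pvKey) := by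
  induction xs with
  | nil => simp [pvNums, pvTexts]
  | cons x t ih =>
    cases h : PySem.Int.ofStr? x with
    | some n =>
      simp only [pvNums, pvTexts, List.filterMap_cons, List.filter_cons, h, Option.isNone_some,
        List.map_cons, List.cons_append, List.map]
      simpa [pvKey, h, pvNums, pvTexts] using ih.cons (toLex (Sum.inl n : Int ⊕ String))
    | none =>
      have hk : pvKey x = toLex (Sum.inr x : Int ⊕ String) := by simp [pvKey, h]
      simp only [pvNums, pvTexts, List.filterMap_cons, List.filter_cons, h, Option.isNone_none,
        List.map_cons, hk]
      exact List.perm_middle.trans (ih.cons _)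

theorem pvSortedSplit (xs : List String) :
    PySem.List.sorted (xs.map pvKey) (fun x => x) false
    = (PySem.List.sorted (pvNums xs) (fun x => x) false).map (fun n => toLex (Sum.inl n : Int ⊕ String))
      ++ (PySem.List.sorted (pvTexts xs) (fun x => x) false).map (fun s => toLex (Sum.inr s : Int ⊕ String)) := by
  apply PySem.List.sorted_id_eq_of_perm_of_pairwise
  · exact (((PySem.List.sorted_perm (pvNums xs) _ false).map _).append
      ((PySem.List.sorted_perm (pvTexts xs) _ false).map _)).trans (pvPermPart xs)
  · rw [List.pairwise_append]
    refine ⟨?_, ?_, ?_⟩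
    · rw [List.pairwise_map]
      exact (PySem.List.sorted_pairwise (pvNums xs) (fun x => x)).imp
        (fun h => Sum.Lex.inl_le_inl_iff.mpr h)
    · rw [List.pairwise_map]
      exact (PySem.List.sorted_pairwise (pvTexts xs) (fun x => x)).imp
        (fun h => Sum.Lex.inr_le_inr_iff.mpr h)
    · intro a ha b hb
      simp only [List.mem_map] at ha hb
      obtain ⟨n, _, rfl⟩ := ha
      obtain ⟨s, _, rfl⟩ := hb
      exact le_of_lt (Sum.Lex.inl_lt_inr n s)

-- ===== VERDICT (by name: the statement is the Claim_ definition above) =====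
theorem sortAlphaNumericList_spec : Claim_equal_sortAlphaNumericList := by
  intro xs _
  show sortAlphaNumericList xs = sortAlphaNumericList_alt xs
  simp only [sortAlphaNumericList, sortAlphaNumericList_alt, pvFoldA,
    PySem.List.foldl_append_singleton_eq_map, List.nil_append]
  rw [pvSortedSplit]
  simp [List.map_map, Function.comp_def, pvDecode]
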